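-- pv_equiv track=rewrite | github.com/oguzkopan/careerrougelike | backend/agents/meeting_conversation_agent.py | select_participants_for_turn
-- ===== SOURCE A (Python) =====
-- from typing import List, Dict, Any, Optional
--
-- def select_participants_for_turn(
--     participants: List[Dict[str, Any]],
--     stage: str,
--     conversation_history: List[Dict[str, Any]],
--     num_messages: int
-- ) -> List[Dict[str, Any]]:
--     """
--     Select which participants should speak in this turn.
--     Ensures variety and realistic conversation flow.
--
--     Args:
--         participants: List of all participants
--         stage: "initial_discussion" or "response_to_player"
--         conversation_history: Previous conversation messages
--         num_messages: Number of messages to generate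
--
--     Returns:
--         List of selected participants (may include duplicates for multiple messages)
--     """
--     # Get participants who have spoken recently
--     recent_speakers = set()
--     if conversation_history:
--         for msg in conversation_history[-5:]:
--             if msg.get('type') == 'ai_response' and msg.get('participant_id'):
--                 recent_speakers.add(msg['participant_id'])
--
--     # For initial discussion, prefer starting with manager or senior roles
--     if stage == "initial_discussion" and not conversation_history:
--         # Sort by role priority (managers first, then senior roles)
--         priority_roles = ['manager', 'director', 'lead', 'senior']
--         sorted_participants = sorted(
--             participants,
--             key=lambda p: any(role in p['role'].lower() for role in priority_roles),
--             reverse=True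
--         )
--         return sorted_participants[:num_messages]
--
--     # For response to player, prefer participants who haven't spoken recently
--     available_participants = [
--         p for p in participants
--         if p['id'] not in recent_speakers or len(recent_speakers) == len(participants)
--     ]
--
--     if not available_participants:
--         available_participants = participants
--
--     # Select participants, preferring variety
--     selected = []
--     for i in range(min(num_messages, len(available_participants))):
--         selected.append(available_participants[i])
--
--     return selected
-- ===== SOURCE B (Python) =====
-- def select_participants_for_turn(participants, stage, conversation_history, num_messages):
--     # Initial discussion with no history: two-bucket linear partition
--     # (priority roles first, original order kept within each bucket).
--     if stage == "initial_discussion" and not conversation_history: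
--         priority_roles = ('manager', 'director', 'lead', 'senior')
--         priority, rest = [], []
--         for p in participants:
--             bucket = priority if any(r in p['role'].lower() for r in priority_roles) else rest
--             bucket.append(p)
--         return (priority + rest)[:num_messages]
--
--     recent_speakers = {msg['participant_id'] for msg in conversation_history[-5:]
--                        if msg.get('type') == 'ai_response' and msg.get('participant_id')}
--
--     available = [p for p in participants
--                  if p['id'] not in recent_speakers or len(recent_speakers) == len(participants)]
--     if not available:
--         available = participants
--     return available[:max(num_messages, 0)]
-- ===== Notes on version B (the rewrite author's own statement) =====
-- stated objective: simpler
-- what changed: The initial-discussion branch's stable sorted(key=bool, reverse=True) becomes a one-pass two-bucket partition, and the final index-by-index selection loop becomes a plain slice available[:max(num_messages, 0)]; the recent-speakers loop becomes a set comprehension.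
import Mathlib
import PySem

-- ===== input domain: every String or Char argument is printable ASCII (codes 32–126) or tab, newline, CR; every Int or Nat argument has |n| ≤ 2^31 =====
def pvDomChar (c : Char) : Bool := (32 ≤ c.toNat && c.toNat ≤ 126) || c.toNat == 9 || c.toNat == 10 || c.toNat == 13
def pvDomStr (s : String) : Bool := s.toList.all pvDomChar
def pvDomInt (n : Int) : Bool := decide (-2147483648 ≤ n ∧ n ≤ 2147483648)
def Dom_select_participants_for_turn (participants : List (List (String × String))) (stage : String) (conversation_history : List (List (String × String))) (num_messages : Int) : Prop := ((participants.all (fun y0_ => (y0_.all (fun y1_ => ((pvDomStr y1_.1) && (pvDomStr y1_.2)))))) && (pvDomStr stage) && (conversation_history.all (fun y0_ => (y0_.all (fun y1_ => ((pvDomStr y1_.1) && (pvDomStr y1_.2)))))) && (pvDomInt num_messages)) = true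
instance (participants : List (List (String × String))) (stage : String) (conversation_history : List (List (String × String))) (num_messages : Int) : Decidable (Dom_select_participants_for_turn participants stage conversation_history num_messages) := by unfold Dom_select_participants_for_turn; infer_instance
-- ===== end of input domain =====

-- B replaces A's stable sorted(key=bool, reverse=True) with a two-bucket linear partition and
-- A's index-by-index selection loop with a slice; same return value (objective: simpler).

-- shared dict-access helpers (both Pythons access the same dicts the same way)
def pvGetD (p : List (String × String)) (k d : String) : String :=
  (PySem.Dict.get? (PySem.Dict.mk p) k).getD d

def pvTruthy (o : Option String) : Bool :=
  match o with
  | some s => s != ""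
  | none => false

-- ===== PORT A =====
-- any(role in p['role'].lower() for role in priority_roles)
def pvIsPriorityA (p : List (String × String)) : Bool :=
  ["manager", "director", "lead", "senior"].any
    (fun r => PySem.Str.isIn r (PySem.Str.lower (pvGetD p "role" "")))

-- the recent_speakers loop of A (runs only when conversation_history is non-empty)
def pvRecentSpeakersA (conversation_history : List (List (String × String))) : PySem.Set String :=
  if conversation_history == [] then PySem.Set.empty
  else
    (PySem.List.slice conversation_history (some (-5)) none).foldl
      (fun acc msg =>
        if (PySem.Dict.get? (PySem.Dict.mk msg) "type" == some "ai_response")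
            && pvTruthy (PySem.Dict.get? (PySem.Dict.mk msg) "participant_id")
        then PySem.Set.add acc (pvGetD msg "participant_id" "")
        else acc)
      PySem.Set.empty

def select_participants_for_turn (participants : List (List (String × String))) (stage : String) (conversation_history : List (List (String × String))) (num_messages : Int) : List (List (String × String)) :=
  let recent_speakers := pvRecentSpeakersA conversation_history
  if (stage == "initial_discussion") && (conversation_history == []) then
    PySem.List.slice (PySem.List.sorted participants pvIsPriorityA true) none (some num_messages)
  else
    let available0 := participants.filter (fun p =>
      !(PySem.Set.contains recent_speakers (pvGetD p "id" ""))
        || (PySem.Set.len recent_speakers == (participants.length : Int)))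
    let available := if available0 == [] then participants else available0
    (PySem.List.pyRange 0 (min num_messages (available.length : Int))).foldl
      (fun sel i => sel ++ [PySem.List.pyGetD available i []]) []

-- ===== PORT B =====
def pvIsPriorityB (p : List (String × String)) : Bool :=
  ["manager", "director", "lead", "senior"].any
    (fun r => PySem.Str.isIn r (PySem.Str.lower (pvGetD p "role" "")))

def select_participants_for_turn_alt (participants : List (List (String × String))) (stage : String) (conversation_history : List (List (String × String))) (num_messages : Int) : List (List (String × String)) :=
  if (stage == "initial_discussion") && (conversation_history == []) then
    let buckets := participants.foldl
      (fun (b : List (List (String × String)) × List (List (String × String))) p =>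
        if pvIsPriorityB p then (b.1 ++ [p], b.2) else (b.1, b.2 ++ [p]))
      ([], [])
    PySem.List.slice (buckets.1 ++ buckets.2) none (some num_messages)
  else
    let recent_speakers : PySem.Set String := PySem.Set.ofList
      (((PySem.List.slice conversation_history (some (-5)) none).filter
          (fun msg => (PySem.Dict.get? (PySem.Dict.mk msg) "type" == some "ai_response")
            && pvTruthy (PySem.Dict.get? (PySem.Dict.mk msg) "participant_id"))).map
        (fun msg => pvGetD msg "participant_id" ""))
    let available0 := participants.filter (fun p =>
      !(PySem.Set.contains recent_speakers (pvGetD p "id" ""))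
        || (PySem.Set.len recent_speakers == (participants.length : Int)))
    let available := if available0 == [] then participants else available0
    PySem.List.slice available none (some (max num_messages 0))

-- ===== PRECONDITION & SPEC =====
-- Pre_ excludes exactly the inputs where A raises KeyError: a participant missing the 'role'
-- key in the initial-discussion branch, or missing the 'id' key in the other branch.
def Pre_select_participants_for_turn (participants : List (List (String × String))) (stage : String) (conversation_history : List (List (String × String))) (num_messages : Int) : Prop :=
  (stage = "initial_discussion" ∧ conversation_history = [] →
    ∀ p ∈ participants, PySem.Dict.contains (PySem.Dict.mk p) "role" = true) ∧
  (¬ (stage = "initial_discussion" ∧ conversation_history = []) →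
    ∀ p ∈ participants, PySem.Dict.contains (PySem.Dict.mk p) "id" = true)
instance (participants : List (List (String × String))) (stage : String) (conversation_history : List (List (String × String))) (num_messages : Int) : Decidable (Pre_select_participants_for_turn participants stage conversation_history num_messages) := by unfold Pre_select_participants_for_turn; infer_instance

def pvWitness_select_participants_for_turn : (List (List (String × String))) × String × (List (List (String × String))) × Int :=
  ([[("role", "Manager"), ("id", "a")], [("role", "dev"), ("id", "b")]], "initial_discussion", [], 1)

def Spec_select_participants_for_turn (participants : List (List (String × String))) (stage : String) (conversation_history : List (List (String × String))) (num_messages : Int) (out : List (List (String × String))) : Prop := out = select_participants_for_turn_alt participants stage conversation_history num_messages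
instance (participants : List (List (String × String))) (stage : String) (conversation_history : List (List (String × String))) (num_messages : Int) (out : List (List (String × String))) : Decidable (Spec_select_participants_for_turn participants stage conversation_history num_messages out) := by unfold Spec_select_participants_for_turn; infer_instance

-- ===== CLAIM (what is proved, stated in full; the proofs are below) =====
def Claim_equal_select_participants_for_turn : Prop := ∀ (participants : List (List (String × String))) (stage : String) (conversation_history : List (List (String × String))) (num_messages : Int), Dom_select_participants_for_turn participants stage conversation_history num_messages → Pre_select_participants_for_turn participants stage conversation_history num_messages → Spec_select_participants_for_turn participants stage conversation_history num_messages (select_participants_for_turn participants stage conversation_history num_messages)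

-- ===== LEMMAS AND PROOFS =====

-- insertBy with the reverse-Bool comparison appends a false-key element at the end
lemma insertBy_false {α : Type} (key : α → Bool) (x : α) (l : List α) (hx : key x = false) :
    PySem.List.insertBy (fun a b => decide (key b < key a)) x l = l ++ [x] := by
  induction l with
  | nil => rfl
  | cons y ys ih =>
      simp [PySem.List.insertBy, hx, ih]

-- and places a true-key element after the true-key prefix, before the false-key tail
lemma insertBy_true {α : Type} (key : α → Bool) (x : α) (P R : List α) (hx : key x = true)
    (hP : ∀ p ∈ P, key p = true) (hR : ∀ r ∈ R, key r = false) :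
    PySem.List.insertBy (fun a b => decide (key b < key a)) x (P ++ R) = P ++ x :: R := by
  induction P with
  | nil =>
      cases R with
      | nil => rfl
      | cons r rs =>
          have hr : key r = false := hR r (by simp)
          simp [PySem.List.insertBy, hx, hr]
  | cons p ps ih =>
      have hp : key p = true := hP p (by simp)
      have := ih (fun q hq => hP q (by simp [hq]))
      simp [PySem.List.insertBy, hx, hp, this]

-- the insertion-sort fold with a Bool key, reverse=True, partitions stably
lemma foldl_insertBy_partition {α : Type} (key : α → Bool) :
    ∀ (xs P R : List α), (∀ p ∈ P, key p = true) → (∀ r ∈ R, key r = false) →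
    xs.foldl (fun acc x => PySem.List.insertBy (fun a b => decide (key b < key a)) x acc) (P ++ R)
      = (P ++ xs.filter key) ++ (R ++ xs.filter (fun x => !key x)) := by
  intro xs
  induction xs with
  | nil => intro P R _ _; simp
  | cons x t ih =>
      intro P R hP hR
      by_cases hx : key x = true
      · have h1 := insertBy_true key x P R hx hP hR
        have h2 := ih (P ++ [x]) R
          (by intro q hq; rcases List.mem_append.mp hq with h | h
              · exact hP q h
              · simp at h; simpa [h] using hx)
          hR
        simp only [List.foldl_cons, h1]
        have : P ++ x :: R = (P ++ [x]) ++ R := by simp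
        rw [this, h2]
        simp [hx]
      · have hx' : key x = false := by simpa using hx
        have h1 : PySem.List.insertBy (fun a b => decide (key b < key a)) x (P ++ R)
            = P ++ (R ++ [x]) := by
          have := insertBy_false key x (P ++ R) hx'
          simpa using this
        have h2 := ih P (R ++ [x]) hP
          (by intro q hq; rcases List.mem_append.mp hq with h | h
              · exact hR q h
              · simp at h; simpa [h] using hx')
        simp only [List.foldl_cons, h1, h2]
        simp [hx']

-- sorted(xs, key=bool, reverse=True) is exactly the stable two-bucket partition
lemma sorted_bool_rev_eq_partition {α : Type} (key : α → Bool) (xs : List α) :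
    PySem.List.sorted xs key true = xs.filter key ++ xs.filter (fun x => !key x) := by
  rw [PySem.List.sorted_rev_eq_foldl_insertBy]
  simpa using foldl_insertBy_partition key xs [] [] (by simp) (by simp)

-- B's bucket fold computes the two filters
lemma buckets_eq_filters {α : Type} (f : α → Bool) (xs : List α) :
    ∀ (P R : List α),
    xs.foldl (fun (b : List α × List α) p => if f p then (b.1 ++ [p], b.2) else (b.1, b.2 ++ [p])) (P, R)
      = (P ++ xs.filter f, R ++ xs.filter (fun x => !f x)) := by
  induction xs with
  | nil => intro P R; simp
  | cons x t ih =>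
      intro P R
      by_cases hx : f x = true
      · simp [hx, ih]
      · have hx' : f x = false := by simpa using hx
        simp [hx', ih]

-- A's conditional-add fold over the recent messages equals B's set comprehension
lemma foldl_if_add_eq_ofList {α β : Type} [BEq β] (c : α → Bool) (f : α → β) :
    ∀ (l : List α) (acc : PySem.Set β),
    l.foldl (fun a m => if c m then PySem.Set.add a (f m) else a) acc
      = ((l.filter c).map f).foldl PySem.Set.add acc := by
  intro l
  induction l with
  | nil => intro acc; rfl
  | cons x t ih =>
      intro acc
      by_cases hx : c x = true
      · simp [hx, ih]
      · have hx' : c x = false := by simpa using hx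
        simp [hx', ih]

lemma recent_speakers_eq (conversation_history : List (List (String × String))) :
    pvRecentSpeakersA conversation_history
      = PySem.Set.ofList
          (((PySem.List.slice conversation_history (some (-5)) none).filter
              (fun msg => (PySem.Dict.get? (PySem.Dict.mk msg) "type" == some "ai_response")
                && pvTruthy (PySem.Dict.get? (PySem.Dict.mk msg) "participant_id"))).map
            (fun msg => pvGetD msg "participant_id" "")) := by
  unfold pvRecentSpeakersA
  by_cases h : conversation_history = []
  · subst h
    simp [PySem.List.slice, PySem.Set.empty, PySem.Set.ofList]
  · simp only [h, beq_iff_eq]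
    rw [foldl_if_add_eq_ofList, PySem.Set.ofList_eq_foldl]
    rfl

-- the prefix of length k of xs, read index by index
lemma map_getD_range_eq_take {α : Type} (xs : List α) (d : α) :
    ∀ (k : Nat), k ≤ xs.length → (List.range k).map (fun j => xs.getD j d) = xs.take k := by
  intro k
  induction k with
  | zero => intro _; simp
  | succ n ih =>
      intro hk
      have hn : n < xs.length := by omega
      rw [List.range_succ, List.map_append, ih (by omega)]
      rw [List.take_add_one]
      simp [List.getElem?_eq_getElem hn]

lemma pyRange_neg (m : Int) (hm : m ≤ 0) : PySem.List.pyRange 0 m = [] := by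
  rw [List.eq_nil_iff_forall_not_mem]
  intro x hx
  have := (PySem.List.mem_pyRange_one (a := 0) (b := m) (x := x)).mp hx
  omega

-- A's index loop over range(min(n, len)) is the slice available[:max(n, 0)]
lemma loop_eq_slice {α : Type} (xs : List α) (d : α) (n : Int) :
    (PySem.List.pyRange 0 (min n (xs.length : Int))).foldl
      (fun sel i => sel ++ [PySem.List.pyGetD xs i d]) []
      = PySem.List.slice xs none (some (max n 0)) := by
  by_cases hn : n ≤ 0
  · rw [pyRange_neg _ (by omega)]
    have : max n 0 = 0 := by omega
    rw [this, PySem.List.slice_to xs le_rfl]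
    simp
  · have h0 : (0:Int) ≤ n := by omega
    have hmax : max n 0 = n := by omega
    have hm0 : (0:Int) ≤ min n (xs.length : Int) := by
      have : (0:Int) ≤ (xs.length : Int) := by positivity
      omega
    have hk : min n (xs.length : Int) = ((min n (xs.length : Int)).toNat : Int) := by omega
    set k : Nat := (min n (xs.length : Int)).toNat with hkdef
    have hkle : k ≤ xs.length := by omega
    rw [hmax, hk, PySem.List.pyRange_zero_natCast,
      PySem.List.foldl_append_singleton_eq_map]
    have : List.map (fun i => PySem.List.pyGetD xs i d) (List.map (fun k : Nat => (k:Int)) (List.range k))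
        = List.map (fun j : Nat => xs.getD j d) (List.range k) := by
      rw [List.map_map]; apply List.map_congr_left; intro j _
      exact PySem.List.pyGetD_natCast xs j d
    rw [List.nil_append, this, map_getD_range_eq_take xs d k hkle,
      PySem.List.slice_to xs h0]
    by_cases hcase : n.toNat ≤ xs.length
    · have : k = n.toNat := by omega
      rw [this]
    · have hk2 : k = xs.length := by omega
      rw [hk2, List.take_length, List.take_of_length_le (by omega)]

-- ===== VERDICT (by name: the statement is the Claim_ definition above) =====
theorem select_participants_for_turn_spec : Claim_equal_select_participants_for_turn := by
  intro participants stage conversation_history num_messages _ _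
  unfold Spec_select_participants_for_turn
  unfold select_participants_for_turn select_participants_for_turn_alt
  have hBA : pvIsPriorityB = pvIsPriorityA := rfl
  by_cases h : ((stage == "initial_discussion") && (conversation_history == [])) = true
  · simp only [h, if_true]
    rw [sorted_bool_rev_eq_partition pvIsPriorityA participants,
      buckets_eq_filters pvIsPriorityB participants [] [], hBA]
    simp
  · have h' : ((stage == "initial_discussion") && (conversation_history == [])) = false := by
      simpa using h
    simp only [h', Bool.false_eq_true, if_false]
    rw [recent_speakers_eq conversation_history]
    exact loop_eq_slice _ [] num_messages
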